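-- pv_equiv track=rewrite | github.com/nimallansa937/PhilosopherS_Transformer | corpus/scripts/clean_corpus.py | reconnect_paragraphs
-- ===== SOURCE A (Python) =====
-- def reconnect_paragraphs(text: str) -> str:
--     """Reconnect paragraphs split across PDF pages.
--
--     A paragraph continues if a line ends without sentence-final
--     punctuation and the next line starts with a lowercase letter.
--     """
--     lines = text.split('\n')
--     result = []
--     buffer = ""
--
--     for line in lines:
--         stripped = line.strip()
--         if not stripped:
--             if buffer:
--                 result.append(buffer)
--                 buffer = ""
--             result.append("")
--             continue
--
--         if buffer:
--             # Check if this continues the previous line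
--             if (stripped[0].islower() or stripped[0] in '("\'') and \
--                buffer and buffer[-1] not in '.!?:;':
--                 buffer += " " + stripped
--             else:
--                 result.append(buffer)
--                 buffer = stripped
--         else:
--             buffer = stripped
--
--     if buffer:
--         result.append(buffer)
--
--     return "\n".join(result)
-- ===== SOURCE B (Python) =====
-- def reconnect_paragraphs(text: str) -> str:
--     stripped = [ln.strip() for ln in text.split('\n')]
--     out = []
--     i, n = 0, len(stripped)
--     while i < n:
--         s = stripped[i]
--         if not s:
--             out.append("")
--             i += 1
--             continue
--         # maximal run of consecutive non-blank lines [i, j)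
--         j = i + 1
--         while j < n and stripped[j]:
--             j += 1
--         para, prev = s, s
--         for nxt in stripped[i + 1:j]:
--             if (nxt[0].islower() or nxt[0] in '("\'') and prev[-1] not in '.!?:;':
--                 para += " " + nxt
--             else:
--                 out.append(para)
--                 para = nxt
--             prev = nxt
--         out.append(para)
--         i = j
--     return "\n".join(out)
-- ===== Notes on version B (the rewrite author's own statement) =====
-- stated objective: alternative
-- what changed: Instead of A's single flush-on-the-fly loop carrying a growing buffer, B first strips all lines, then partitions them into blank lines and maximal non-blank runs by index scanning, and reduces each run separately while tracking the previous line (not the accumulated buffer) for the continuation test.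
import Mathlib
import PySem

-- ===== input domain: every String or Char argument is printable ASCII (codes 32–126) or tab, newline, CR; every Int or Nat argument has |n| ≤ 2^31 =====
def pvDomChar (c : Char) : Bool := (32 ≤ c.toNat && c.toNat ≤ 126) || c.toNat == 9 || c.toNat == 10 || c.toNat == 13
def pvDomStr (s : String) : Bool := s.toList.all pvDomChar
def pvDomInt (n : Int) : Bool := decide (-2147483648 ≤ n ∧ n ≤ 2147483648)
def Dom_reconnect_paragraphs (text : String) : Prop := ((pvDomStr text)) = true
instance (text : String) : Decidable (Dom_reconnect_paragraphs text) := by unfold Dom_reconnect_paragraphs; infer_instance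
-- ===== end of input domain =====

-- B restructures A's single flush-on-the-fly loop into: strip all lines, split into blank lines
-- and maximal non-blank runs, join each run separately tracking the previous line (objective: alternative decomposition).

-- ===== PORT A =====
-- stripped[0].islower() or stripped[0] in '("\''
def aStartsCont (s : List Char) : Bool :=
  match s with
  | c :: _ => PySem.Chars.islower c || (c == '(' || c == '"' || c == '\'')
  | [] => false

-- buffer[-1] not in '.!?:;'
def aEndsOpen (b : List Char) : Bool :=
  match b.getLast? with
  | some c => !(c == '.' || c == '!' || c == '?' || c == ':' || c == ';')
  | none => false

def reconnect_paragraphs (text : String) : String :=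
  let lines := PySem.Chars.splitOn text.toList ['\n']
  let st := lines.foldl (fun (st : List (List Char) × List Char) line =>
      let result := st.1
      let buffer := st.2
      let stripped := PySem.Chars.strip line
      if stripped = [] then
        if buffer ≠ [] then (result ++ [buffer, []], []) else (result ++ [[]], buffer)
      else
        if buffer ≠ [] then
          if aStartsCont stripped && (decide (buffer ≠ []) && aEndsOpen buffer) then
            (result, buffer ++ [' '] ++ stripped)
          else
            (result ++ [buffer], stripped)
        else
          (result, stripped)) ([], [])
  let result := if st.2 ≠ [] then st.1 ++ [st.2] else st.1
  String.ofList (PySem.Chars.join ['\n'] result)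

-- ===== PORT B =====
-- nxt[0].islower() or nxt[0] in '("\''
def bLowerOrOpen (s : List Char) : Bool :=
  match s with
  | c :: _ => PySem.Chars.islower c || (c == '(' || c == '"' || c == '\'')
  | [] => false

-- prev[-1] not in '.!?:;'
def bNoSentenceEnd (p : List Char) : Bool :=
  match p.getLast? with
  | some c => !(c == '.' || c == '!' || c == '?' || c == ':' || c == ';')
  | none => false

-- inner for-loop of B: reduce one non-blank run, given current paragraph and previous line
def pvJoinRun : List (List Char) → List Char → List Char → List (List Char)
  | [], para, _prev => [para]
  | nxt :: rest, para, prev =>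
    if bLowerOrOpen nxt && bNoSentenceEnd prev then
      pvJoinRun rest (para ++ [' '] ++ nxt) nxt
    else
      para :: pvJoinRun rest nxt nxt

-- outer while-loop of B: blank lines pass through, maximal non-blank runs are joined
def pvRuns : List (List Char) → List (List Char)
  | [] => []
  | s :: rest =>
    if s = [] then [] :: pvRuns rest
    else
      pvJoinRun (rest.takeWhile (· ≠ [])) s s ++ pvRuns (rest.dropWhile (· ≠ []))
termination_by xs => xs.length
decreasing_by
  · simp
  · have h := List.length_dropWhile_le (· ≠ ([] : List Char)) rest
    simp only [List.length_cons]
    omega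

def reconnect_paragraphs_alt (text : String) : String :=
  let stripped := (PySem.Chars.splitOn text.toList ['\n']).map PySem.Chars.strip
  String.ofList (PySem.Chars.join ['\n'] (pvRuns stripped))

-- ===== PRECONDITION & SPEC =====
def Spec_reconnect_paragraphs (text : String) (out : String) : Prop := out = reconnect_paragraphs_alt text
instance (text : String) (out : String) : Decidable (Spec_reconnect_paragraphs text out) := by unfold Spec_reconnect_paragraphs; infer_instance

-- ===== CLAIM (what is proved, stated in full; the proofs are below) =====
def Claim_equal_reconnect_paragraphs : Prop := ∀ (text : String), Dom_reconnect_paragraphs text → Spec_reconnect_paragraphs text (reconnect_paragraphs text)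

-- ===== LEMMAS AND PROOFS =====

-- A's loop body on an already-stripped line
def aStep (st : List (List Char) × List Char) (stripped : List Char) : List (List Char) × List Char :=
  let result := st.1
  let buffer := st.2
  if stripped = [] then
    if buffer ≠ [] then (result ++ [buffer, []], []) else (result ++ [[]], buffer)
  else
    if buffer ≠ [] then
      if aStartsCont stripped && (decide (buffer ≠ []) && aEndsOpen buffer) then
        (result, buffer ++ [' '] ++ stripped)
      else
        (result ++ [buffer], stripped)
    else
      (result, stripped)

-- A's loop as a recursion emitting the produced lines, with the final flush folded in
def aRec : List (List Char) → List Char → List (List Char)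
  | [], b => if b ≠ [] then [b] else []
  | s :: xs, b =>
    if s = [] then
      if b ≠ [] then b :: [] :: aRec xs [] else [] :: aRec xs b
    else
      if b ≠ [] then
        if aStartsCont s && (decide (b ≠ []) && aEndsOpen b) then aRec xs (b ++ [' '] ++ s)
        else b :: aRec xs s
      else aRec xs s

theorem aRec_foldl (xs : List (List Char)) (res : List (List Char)) (b : List Char) :
    (let st := xs.foldl aStep (res, b);
     if st.2 ≠ [] then st.1 ++ [st.2] else st.1) = res ++ aRec xs b := by
  induction xs generalizing res b with
  | nil => simp [aRec]; split <;> simp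
  | cons s xs ih =>
    simp only [List.foldl_cons, aRec]
    by_cases hs : s = [] <;> by_cases hb : b = [] <;>
      simp only [aStep, hs, hb, if_true, if_false, ne_eq, not_true, not_false_iff] <;>
      simp [aStep, hs, hb, ih] <;> try split <;> simp [ih]

theorem getLast?_append_ne {s : List Char} (b : List Char) (hs : s ≠ []) :
    (b ++ [' '] ++ s).getLast? = s.getLast? :=
  List.getLast?_append_of_ne_nil (b ++ [' ']) hs

-- main correspondence, proved by strong induction on the list length
theorem aRec_runs (n : ℕ) : ∀ xs : List (List Char), xs.length ≤ n →
    (aRec xs [] = pvRuns xs ∧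
     ∀ b prev, b ≠ [] → prev ≠ [] → b.getLast? = prev.getLast? →
       aRec xs b = pvJoinRun (xs.takeWhile (· ≠ [])) b prev ++ pvRuns (xs.dropWhile (· ≠ []))) := by
  induction n with
  | zero =>
    intro xs h
    have : xs = [] := List.eq_nil_of_length_eq_zero (Nat.le_zero.mp h)
    subst this
    refine ⟨by simp [aRec, pvRuns], ?_⟩
    intro b prev hb _ _
    simp [aRec, pvJoinRun, pvRuns, hb]
  | succ n ih =>
    intro xs h
    match xs with
    | [] =>
      refine ⟨by simp [aRec, pvRuns], ?_⟩
      intro b prev hb _ _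
      simp [aRec, pvJoinRun, pvRuns, hb]
    | s :: xs =>
      have hlen : xs.length ≤ n := by simpa using h
      obtain ⟨ihM, ihR⟩ := ih xs hlen
      by_cases hs : s = []
      · subst hs
        constructor
        · simp [aRec, pvRuns, ihM]
        · intro b prev hb hp hlast
          simp [aRec, pvRuns, pvJoinRun, hb, ihM]
      · constructor
        · -- empty buffer: start a new paragraph with s
          rw [show pvRuns (s :: xs) = pvJoinRun (xs.takeWhile (· ≠ [])) s s ++ pvRuns (xs.dropWhile (· ≠ [])) from by
            rw [pvRuns]; simp [hs]]
          simp only [aRec, hs, if_neg hs]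
          simp only [ne_eq, not_true_eq_false, if_false, if_neg (by simp : ¬ (([]:List Char) ≠ []))]
          exact ihR s s hs hs rfl
        · intro b prev hb hp hlast
          have hcond : aEndsOpen b = bNoSentenceEnd prev := by
            simp [aEndsOpen, bNoSentenceEnd, hlast]
          have hfirst : aStartsCont s = bLowerOrOpen s := rfl
          have htake : (s :: xs).takeWhile (· ≠ ([]:List Char)) = s :: xs.takeWhile (· ≠ []) := by
            simp [List.takeWhile_cons, hs]
          have hdrop : (s :: xs).dropWhile (· ≠ ([]:List Char)) = xs.dropWhile (· ≠ []) := by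
            simp [List.dropWhile_cons, hs]
          rw [htake, hdrop, pvJoinRun]
          simp only [aRec, if_neg hs, if_pos hb, decide_eq_true_iff]
          rw [hcond, hfirst]
          simp only [ne_eq, hb, not_false_iff, decide_true, Bool.true_and]
          by_cases hc : (bLowerOrOpen s && bNoSentenceEnd prev) = true
          · rw [if_pos hc, if_pos hc]
            exact ihR (b ++ [' '] ++ s) s (by simp) hs (getLast?_append_ne b hs)
          · rw [if_neg hc, if_neg hc]
            simpa using ihR s s hs hs rfl

-- ===== VERDICT (by name: the statement is the Claim_ definition above) =====
theorem reconnect_paragraphs_spec : Claim_equal_reconnect_paragraphs := by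
  intro text _
  unfold Spec_reconnect_paragraphs reconnect_paragraphs reconnect_paragraphs_alt
  have hfold : (PySem.Chars.splitOn text.toList ['\n']).foldl
      (fun (st : List (List Char) × List Char) line =>
        let result := st.1
        let buffer := st.2
        let stripped := PySem.Chars.strip line
        if stripped = [] then
          if buffer ≠ [] then (result ++ [buffer, []], []) else (result ++ [[]], buffer)
        else
          if buffer ≠ [] then
            if aStartsCont stripped && (decide (buffer ≠ []) && aEndsOpen buffer) then
              (result, buffer ++ [' '] ++ stripped)
            else
              (result ++ [buffer], stripped)
          else
            (result, stripped)) ([], [])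
      = ((PySem.Chars.splitOn text.toList ['\n']).map PySem.Chars.strip).foldl aStep ([], []) := by
    rw [List.foldl_map]
    rfl
  simp only [hfold]
  have h1 := aRec_foldl ((PySem.Chars.splitOn text.toList ['\n']).map PySem.Chars.strip) [] []
  have h2 := (aRec_runs ((PySem.Chars.splitOn text.toList ['\n']).map PySem.Chars.strip).length
      ((PySem.Chars.splitOn text.toList ['\n']).map PySem.Chars.strip) le_rfl).1
  simp only [List.nil_append] at h1
  rw [h1, h2]
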